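-- pv_equiv track=rewrite | github.com/Alvaropz/Python_problems_BinarySearch | 1. Easy/squeezed_list/squeezed_list.py | squeezed_list
-- ===== SOURCE A (Python) =====
-- def squeezed_list(nums):
--     matrix = [nums.copy()]
--     while len(matrix[-1]) > 1:
--         if len(matrix[-1]) > 4:
--             temp_list = []
--             temp_list.append(matrix[-1][0]+matrix[-1][1])
--             temp_list.extend(matrix[-1][2:-2])
--             temp_list.append(matrix[-1][-2]+matrix[-1][-1])
--             matrix.append(temp_list)
--         if len(matrix[-1]) == 4:
--             temp_list = []
--             temp_list.append(matrix[-1][0]+matrix[-1][1])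
--             temp_list.append(matrix[-1][-2]+matrix[-1][-1])
--             matrix.append(temp_list)
--         if len(matrix[-1]) == 3:
--             temp_list = []
--             temp_list.append(sum(matrix[-1]))
--             matrix.append(temp_list)
--         if len(matrix[-1]) == 2:
--             temp_list = []
--             temp_list.append(matrix[-1][0]+matrix[-1][1])
--             matrix.append(temp_list)
--     return matrix
-- ===== SOURCE B (Python) =====
-- def squeezed_list(nums):
--     n = len(nums)
--     rows = [list(nums)]
--     if n <= 1:
--         return rows
--     pre = [0]
--     for x in nums:
--         pre.append(pre[-1] + x)
--     suf = [0]
--     for x in reversed(nums):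
--         suf = [x + suf[0]] + suf
--     for k in range(1, (n - 2) // 2 + 1):
--         rows.append([pre[k + 1]] + nums[k + 1:n - k - 1] + [suf[n - k - 1]])
--     last = rows[-1]
--     if len(last) == 2:
--         rows.append([last[0] + last[1]])
--     else:
--         rows.append([last[0] + last[1] + last[2]])
--     return rows
-- ===== Notes on version B (the rewrite author's own statement) =====
-- stated objective: alternative
-- what changed: B precomputes prefix-sum and suffix-sum arrays in single passes and emits each squeezed row directly by index (row k = [pre[k+1]] + nums[k+1:n-k-1] + [suf[n-k-1]]), replacing A's while loop that derives every row from the previous row through four chained length-case branches.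
import Mathlib
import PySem

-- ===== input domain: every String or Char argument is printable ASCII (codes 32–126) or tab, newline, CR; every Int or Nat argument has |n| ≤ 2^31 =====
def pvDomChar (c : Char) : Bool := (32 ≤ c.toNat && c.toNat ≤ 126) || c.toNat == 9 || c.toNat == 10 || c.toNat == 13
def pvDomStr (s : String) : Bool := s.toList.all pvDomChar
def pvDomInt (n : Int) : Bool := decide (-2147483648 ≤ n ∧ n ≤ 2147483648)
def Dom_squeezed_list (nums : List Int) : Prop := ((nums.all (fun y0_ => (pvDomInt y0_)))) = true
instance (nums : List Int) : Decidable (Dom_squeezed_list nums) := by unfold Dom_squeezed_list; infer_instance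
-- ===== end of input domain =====

-- B builds each squeezed row directly from precomputed prefix/suffix sums (one pass per array,
-- then one row per index), instead of A's while loop deriving every row from the previous one
-- through chained length cases; a different decomposition of the same task (objective: alternative).



-- ===== PORT A =====
-- matrix[-1]
def aLast (m : List (List Int)) : List Int := PySem.List.pyGetD m (-1) []

-- one iteration of A's while body: the four chained ifs, each re-reading matrix[-1]
def aBody (m : List (List Int)) : List (List Int) :=
  let m1 := if 4 < (aLast m).length then
      m ++ [ (PySem.List.pyGetD (aLast m) 0 0 + PySem.List.pyGetD (aLast m) 1 0)
             :: (PySem.List.slice (aLast m) (some 2) (some (-2))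
                 ++ [PySem.List.pyGetD (aLast m) (-2) 0 + PySem.List.pyGetD (aLast m) (-1) 0]) ]
    else m
  let m2 := if (aLast m1).length = 4 then
      m1 ++ [ [PySem.List.pyGetD (aLast m1) 0 0 + PySem.List.pyGetD (aLast m1) 1 0,
               PySem.List.pyGetD (aLast m1) (-2) 0 + PySem.List.pyGetD (aLast m1) (-1) 0] ]
    else m1
  let m3 := if (aLast m2).length = 3 then m2 ++ [[(aLast m2).sum]] else m2
  if (aLast m3).length = 2 then
      m3 ++ [[PySem.List.pyGetD (aLast m3) 0 0 + PySem.List.pyGetD (aLast m3) 1 0]]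
  else m3

-- while len(matrix[-1]) > 1 (fuel only makes the loop total; nums.length+1 iterations always suffice)
def aWhile : Nat → List (List Int) → List (List Int)
  | 0, m => m
  | fuel+1, m => if 1 < (aLast m).length then aWhile fuel (aBody m) else m

def squeezed_list (nums : List Int) : List (List Int) := aWhile (nums.length + 1) [nums]

-- ===== PORT B =====
def squeezed_list_alt (nums : List Int) : List (List Int) :=
  let n : Int := PySem.List.len nums
  let rows : List (List Int) := [nums]
  if n ≤ 1 then rows
  else
    let pre : List Int := nums.foldl (fun p x => p ++ [PySem.List.pyGetD p (-1) 0 + x]) [0]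
    let suf : List Int := nums.reverse.foldl (fun s x => (x + PySem.List.pyGetD s 0 0) :: s) [0]
    let rows := (PySem.List.pyRange 1 (PySem.Int.floordiv (n - 2) 2 + 1) 1).foldl
        (fun rs k => rs ++ [ PySem.List.pyGetD pre (k + 1) 0
              :: (PySem.List.slice nums (some (k + 1)) (some (n - k - 1))
                  ++ [PySem.List.pyGetD suf (n - k - 1) 0]) ]) rows
    let last := PySem.List.pyGetD rows (-1) []
    if last.length = 2 then
      rows ++ [[PySem.List.pyGetD last 0 0 + PySem.List.pyGetD last 1 0]]
    else
      rows ++ [[PySem.List.pyGetD last 0 0 + PySem.List.pyGetD last 1 0 + PySem.List.pyGetD last 2 0]]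


-- ===== PRECONDITION & SPEC =====
def Spec_squeezed_list (nums : List Int) (out : List (List Int)) : Prop := out = squeezed_list_alt nums
instance (nums : List Int) (out : List (List Int)) : Decidable (Spec_squeezed_list nums out) := by unfold Spec_squeezed_list; infer_instance

-- ===== CLAIM (what is proved, stated in full; the proofs are below) =====
def Claim_equal_squeezed_list : Prop := ∀ (nums : List Int), Dom_squeezed_list nums → Spec_squeezed_list nums (squeezed_list nums)

-- ===== LEMMAS AND PROOFS =====

-- the single squeeze step, and the canonical sequence of rows it generates
def srow (r : List Int) : List Int :=
  if 4 ≤ r.length then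
    (r.getD 0 0 + r.getD 1 0)
      :: ((r.drop 2).take (r.length - 4) ++ [r.getD (r.length - 2) 0 + r.getD (r.length - 1) 0])
  else [r.sum]


lemma srow_length (r : List Int) (h : 2 ≤ r.length) :
    (srow r).length = if 4 ≤ r.length then r.length - 2 else 1 := by
  unfold srow
  split_ifs with h4
  · simp [List.length_take, List.length_drop]; omega
  · simp

def iterRows (r : List Int) : List (List Int) :=
  if r.length ≤ 1 then [r]
  else r :: iterRows (srow r)
termination_by r.length
decreasing_by
  have := srow_length r (by omega)
  split_ifs at this <;> omega

lemma iterRows_step (r : List Int) (h : 2 ≤ r.length) :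
    iterRows r = r :: iterRows (srow r) := by
  rw [iterRows]; rw [if_neg (by omega)]

lemma iterRows_single (r : List Int) (h : r.length ≤ 1) : iterRows r = [r] := by
  rw [iterRows]; rw [if_pos h]
lemma aLast_app (m : List (List Int)) (r : List Int) : aLast (m ++ [r]) = r :=
  PySem.List.pyGetD_neg_one_append_singleton m r []

lemma slice_mid (r : List Int) (h : 4 < r.length) :
    PySem.List.slice r (some 2) (some (-2)) = (r.drop 2).take (r.length - 4) := by
  simp [PySem.List.slice, PySem.List.clampIdx]
  rw [if_neg (by omega), min_eq_left (by omega)]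
  congr 1
  omega

-- big squeeze term = srow
lemma abig_eq_srow (r : List Int) (h : 4 < r.length) :
    (PySem.List.pyGetD r 0 0 + PySem.List.pyGetD r 1 0)
      :: (PySem.List.slice r (some 2) (some (-2))
          ++ [PySem.List.pyGetD r (-2) 0 + PySem.List.pyGetD r (-1) 0]) = srow r := by
  rw [srow, if_pos (by omega), slice_mid r h]
  rw [PySem.List.pyGetD_neg_ofNat r 2 0 (by omega) (by omega)]
  rw [show ((-1 : Int)) = -(1:Nat) by norm_num, PySem.List.pyGetD_neg_natCast r (k := 1) 0 (by omega) (by omega)]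
  rw [show ((0:Int)) = ((0:Nat):Int) by norm_num, PySem.List.pyGetD_natCast]
  rw [show ((1:Int)) = ((1:Nat):Int) by norm_num, PySem.List.pyGetD_natCast]
  rw [List.getD_eq_getElem r _ (show r.length - 2 < r.length by omega),
      List.getD_eq_getElem r _ (show r.length - 1 < r.length by omega)]

lemma aLast_def (xs : List (List Int)) : aLast xs = xs.getLastD [] := by
  cases xs with
  | nil => rfl
  | cons a t =>
    rw [aLast, PySem.List.pyGetD_neg_one (a :: t) [] (by simp), List.getLastD_eq_getLast?,
      List.getLast?_eq_some_getLast (by simp)]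
    simp

lemma aBody_gt6 (m : List (List Int)) (r : List Int) (h : 6 < r.length) :
    aBody (m ++ [r]) = (m ++ [r]) ++ [srow r] := by
  have hl : (srow r).length = r.length - 2 := by
    rw [srow_length r (by omega), if_pos (by omega)]
  simp only [aBody, aLast_app m r, if_pos (show 4 < r.length by omega),
    abig_eq_srow r (by omega)]
  simp [aLast_def, hl, show ¬(r.length - 2 = 4) by omega, show ¬(r.length - 2 = 3) by omega,
    show ¬(r.length - 2 = 2) by omega]

lemma aBody_2 (m : List (List Int)) (a b : Int) :
    aBody (m ++ [[a, b]]) = (m ++ [[a, b]]) ++ [srow [a, b]] := by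
  simp [aBody, aLast_def, srow, PySem.List.pyGetD, PySem.List.pyGet?, PySem.List.pyIdx?, PySem.List.slice, PySem.List.clampIdx]

lemma aBody_3 (m : List (List Int)) (a b c : Int) :
    aBody (m ++ [[a, b, c]]) = (m ++ [[a, b, c]]) ++ [srow [a, b, c]] := by
  simp [aBody, aLast_def, srow, PySem.List.pyGetD, PySem.List.pyGet?, PySem.List.pyIdx?, PySem.List.slice, PySem.List.clampIdx]

lemma aBody_4 (m : List (List Int)) (a b c d : Int) :
    aBody (m ++ [[a, b, c, d]]) = (m ++ [[a, b, c, d]]) ++ [srow [a, b, c, d], srow (srow [a, b, c, d])] := by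
  simp [aBody, aLast_def, srow, PySem.List.pyGetD, PySem.List.pyGet?, PySem.List.pyIdx?, PySem.List.slice, PySem.List.clampIdx]

lemma aBody_5 (m : List (List Int)) (a b c d e : Int) :
    aBody (m ++ [[a, b, c, d, e]]) = (m ++ [[a, b, c, d, e]]) ++ [srow [a, b, c, d, e], srow (srow [a, b, c, d, e])] := by
  simp [aBody, aLast_def, srow, PySem.List.pyGetD, PySem.List.pyGet?, PySem.List.pyIdx?, PySem.List.slice, PySem.List.clampIdx]

lemma aBody_6 (m : List (List Int)) (a b c d e f : Int) :
    aBody (m ++ [[a, b, c, d, e, f]]) = (m ++ [[a, b, c, d, e, f]]) ++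
      [srow [a, b, c, d, e, f], srow (srow [a, b, c, d, e, f]), srow (srow (srow [a, b, c, d, e, f]))] := by
  simp [aBody, aLast_def, srow, PySem.List.pyGetD, PySem.List.pyGet?, PySem.List.pyIdx?, PySem.List.slice, PySem.List.clampIdx]

lemma aWhile_iter : ∀ (fuel : Nat) (m : List (List Int)) (r : List Int), r.length ≤ fuel →
    aWhile fuel (m ++ [r]) = m ++ iterRows r := by
  intro fuel
  induction fuel with
  | zero =>
    intro m r hr
    rw [iterRows_single r (by omega)]
    rfl
  | succ f ih =>
    intro m r hr
    rw [aWhile, aLast_app]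
    by_cases h1 : 1 < r.length
    · rw [if_pos h1]
      by_cases h6 : 6 < r.length
      · rw [aBody_gt6 m r h6,
          ih (m ++ [r]) (srow r) (by rw [srow_length r (by omega), if_pos (by omega)]; omega),
          iterRows_step r (by omega)]
        simp
      · -- 2 ≤ r.length ≤ 6 : destructure
        rcases r with _|⟨a, _|⟨b, _|⟨c, _|⟨d, _|⟨e, _|⟨f', rest⟩⟩⟩⟩⟩⟩
        · simp at h1
        · simp at h1
        · -- length 2
          have l1 : (srow [a, b]).length = 1 := by
            rw [srow_length _ (by simp), if_neg (by simp)]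
          rw [aBody_2, ih _ _ (by omega), iterRows_step [a, b] (by simp),
            iterRows_single (srow [a, b]) (by omega)]
          simp
        · -- length 3
          have l1 : (srow [a, b, c]).length = 1 := by
            rw [srow_length _ (by simp), if_neg (by simp)]
          rw [aBody_3, ih _ _ (by omega), iterRows_step [a, b, c] (by simp),
            iterRows_single (srow [a, b, c]) (by omega)]
          simp
        · -- length 4
          have l1 : (srow [a, b, c, d]).length = 2 := by
            rw [srow_length _ (by simp), if_pos (by simp)]; simp
          have l2 : (srow (srow [a, b, c, d])).length = 1 := by
            rw [srow_length _ (by omega), if_neg (by omega)]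
          rw [aBody_4, show (m ++ [[a, b, c, d]]) ++ [srow [a, b, c, d], srow (srow [a, b, c, d])]
                = (m ++ [[a, b, c, d]] ++ [srow [a, b, c, d]]) ++ [srow (srow [a, b, c, d])] by simp,
            ih _ _ (by omega),
            iterRows_step [a, b, c, d] (by simp), iterRows_step (srow [a, b, c, d]) (by omega),
            iterRows_single (srow (srow [a, b, c, d])) (by omega)]
          simp
        · -- length 5
          have l1 : (srow [a, b, c, d, e]).length = 3 := by
            rw [srow_length _ (by simp), if_pos (by simp)]; simp
          have l2 : (srow (srow [a, b, c, d, e])).length = 1 := by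
            rw [srow_length _ (by omega), if_neg (by omega)]
          rw [aBody_5, show (m ++ [[a, b, c, d, e]]) ++ [srow [a, b, c, d, e], srow (srow [a, b, c, d, e])]
                = (m ++ [[a, b, c, d, e]] ++ [srow [a, b, c, d, e]]) ++ [srow (srow [a, b, c, d, e])] by simp,
            ih _ _ (by omega),
            iterRows_step [a, b, c, d, e] (by simp), iterRows_step (srow [a, b, c, d, e]) (by omega),
            iterRows_single (srow (srow [a, b, c, d, e])) (by omega)]
          simp
        · -- length 6 or more
          have hlen : rest.length = 0 := by simp at h6 hr ⊢; omega
          have hnil : rest = [] := List.length_eq_zero_iff.mp hlen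
          subst hnil
          have l1 : (srow [a, b, c, d, e, f']).length = 4 := by
            rw [srow_length _ (by simp), if_pos (by simp)]; simp
          have l2 : (srow (srow [a, b, c, d, e, f'])).length = 2 := by
            rw [srow_length _ (by omega), if_pos (by omega)]; omega
          have l3 : (srow (srow (srow [a, b, c, d, e, f']))).length = 1 := by
            rw [srow_length _ (by omega), if_neg (by omega)]
          rw [aBody_6, show (m ++ [[a, b, c, d, e, f']]) ++ [srow [a, b, c, d, e, f'], srow (srow [a, b, c, d, e, f']), srow (srow (srow [a, b, c, d, e, f']))]
                = (m ++ [[a, b, c, d, e, f']] ++ [srow [a, b, c, d, e, f']] ++ [srow (srow [a, b, c, d, e, f'])]) ++ [srow (srow (srow [a, b, c, d, e, f']))] by simp,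
            ih _ _ (by omega),
            iterRows_step [a, b, c, d, e, f'] (by simp), iterRows_step (srow [a, b, c, d, e, f']) (by omega),
            iterRows_step (srow (srow [a, b, c, d, e, f'])) (by omega),
            iterRows_single (srow (srow (srow [a, b, c, d, e, f']))) (by omega)]
          simp
    · rw [if_neg h1, iterRows_single r (by omega)]

lemma squeezed_eq_iter (nums : List Int) : squeezed_list nums = iterRows nums := by
  have := aWhile_iter (nums.length + 1) [] nums (by omega)
  simpa [squeezed_list] using this

def rowAt (nums : List Int) (k : Nat) : List Int :=
  (nums.take (k+1)).sum ::
    ((nums.drop (k+1)).take (nums.length - 2*k - 2) ++ [(nums.drop (nums.length - k - 1)).sum])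

lemma rowAt_length (nums : List Int) (k : Nat) (h : 2*k+2 ≤ nums.length) :
    (rowAt nums k).length = nums.length - 2*k := by
  simp [rowAt]; omega

lemma rowAt_sum (nums : List Int) (k : Nat) (h : 2*k+2 ≤ nums.length) :
    (rowAt nums k).sum = nums.sum := by
  have h1 : (nums.drop (k+1)).take (nums.length - 2*k - 2) ++ nums.drop (nums.length - k - 1)
      = nums.drop (k+1) := by
    have : nums.drop (nums.length - k - 1) = (nums.drop (k+1)).drop (nums.length - 2*k - 2) := by
      rw [List.drop_drop]; congr 1; omega
    rw [this, List.take_append_drop]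
  have h2 : (nums.take (k+1)).sum + (nums.drop (k+1)).sum = nums.sum := by
    rw [← List.sum_append, List.take_append_drop]
  calc (rowAt nums k).sum
      = (nums.take (k+1)).sum + (((nums.drop (k+1)).take (nums.length - 2*k - 2)).sum
          + (nums.drop (nums.length - k - 1)).sum) := by simp [rowAt]
    _ = (nums.take (k+1)).sum + (nums.drop (k+1)).sum := by rw [← List.sum_append, h1]
    _ = nums.sum := h2

lemma srow_small (r : List Int) (h : r.length < 4) : srow r = [r.sum] := by
  rw [srow, if_neg (by omega)]

lemma srow_rowAt_final (nums : List Int) (k : Nat) (h2 : 2*k+2 ≤ nums.length)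
    (h3 : nums.length ≤ 2*k+3) : srow (rowAt nums k) = [nums.sum] := by
  rw [srow_small _ (by rw [rowAt_length nums k h2]; omega), rowAt_sum nums k h2]

lemma srow_init (nums : List Int) (h : 4 ≤ nums.length) : srow nums = rowAt nums 1 := by
  rw [srow, if_pos h, rowAt]
  congr 1
  · -- heads
    rw [List.getD_eq_getElem nums 0 (by omega), List.getD_eq_getElem nums 0 (by omega)]
    rw [show (1:Nat) + 1 = 0 + 1 + 1 by rfl, List.sum_take_succ nums 1 (by omega),
        List.sum_take_succ nums 0 (by omega)]
    simp
  · rw [show (1:Nat) + 1 = 2 from rfl, show nums.length - 2*1 - 2 = nums.length - 4 by omega]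
    congr 1
    rw [List.getD_eq_getElem nums _ (by omega), List.getD_eq_getElem nums _ (by omega)]
    have i1 : nums.length - 1 - 1 = nums.length - 2 := by omega
    rw [i1]
    have e1 : nums.drop (nums.length - 2) = nums[nums.length - 2] :: nums.drop (nums.length - 2 + 1) :=
      List.drop_eq_getElem_cons (by omega)
    have i2 : nums.length - 2 + 1 = nums.length - 1 := by omega
    have e2 : nums.drop (nums.length - 1) = nums[nums.length - 1] :: nums.drop (nums.length - 1 + 1) :=
      List.drop_eq_getElem_cons (by omega)
    have e3 : nums.drop (nums.length - 1 + 1) = [] := List.drop_eq_nil_of_le (by omega)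
    rw [e1, i2, e2, e3]
    simp

lemma srow_rowAt (nums : List Int) (k : Nat) (h : 2*k+4 ≤ nums.length) :
    srow (rowAt nums k) = rowAt nums (k+1) := by
  have hM : ((nums.drop (k+1)).take (nums.length - 2*k-2)).length = nums.length - 2*k - 2 := by
    simp; omega
  have hlen : (rowAt nums k).length = nums.length - 2*k := rowAt_length nums k (by omega)
  have gl : ∀ (A : List Int) (s : Int) (i : Nat) (hi : i < A.length), (A ++ [s]).getD i 0 = A[i] := by
    intro A s i hi
    rw [List.getD_eq_getElem _ _ (by simp; omega), List.getElem_append_left hi]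
  have c1 : (rowAt nums k).getD 1 0 = nums[k+1]'(by omega) := by
    rw [rowAt, List.getD_cons_succ, gl _ _ 0 (by omega)]
    rw [List.getElem_take, List.getElem_drop]
  have c2 : (rowAt nums k).getD (nums.length - 2*k - 2) 0 = nums[nums.length - k - 2]'(by omega) := by
    rw [rowAt, show nums.length - 2*k - 2 = (nums.length - 2*k - 3) + 1 by omega,
      List.getD_cons_succ, gl _ _ (nums.length - 2*k - 3) (by first | (simp; omega) | simp | omega)]
    rw [List.getElem_take, List.getElem_drop]
    congr 1; omega
  have c3 : (rowAt nums k).getD (nums.length - 2*k - 1) 0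
      = (nums.drop (nums.length - k - 1)).sum := by
    rw [rowAt, show nums.length - 2*k - 1 = (nums.length - 2*k - 2) + 1 by omega,
      List.getD_cons_succ, List.getD_eq_getElem _ _ (by first | (simp; omega) | simp | omega),
      List.getElem_append_right (by rw [hM])]
    simp [hM]
  have c0 : (rowAt nums k).getD 0 0 = (nums.take (k+1)).sum := rfl
  have cmid : ((rowAt nums k).drop 2).take (nums.length - 2*k - 4)
      = (nums.drop (k+1+1)).take (nums.length - 2*(k+1) - 2) := by
    rw [rowAt, show (2:Nat) = 1 + 1 from rfl, List.drop_succ_cons,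
      List.drop_append_of_le_length (by rw [hM]; omega),
      List.take_append_of_le_length (by rw [List.length_drop, hM]; omega),
      List.drop_take, List.drop_drop, List.take_take]
    congr 1 <;> omega
  rw [srow, if_pos (show (4:Nat) ≤ (rowAt nums k).length by rw [hlen]; omega), hlen]
  rw [c0, c1, c2, c3, cmid]
  rw [rowAt]
  congr 1
  · rw [List.sum_take_succ nums (k+1) (by omega)]
  · congr 2
    rw [show nums.length - (k+1) - 1 = nums.length - k - 2 by omega,
      List.drop_eq_getElem_cons (show nums.length - k - 2 < nums.length by omega),
      show nums.length - k - 2 + 1 = nums.length - k - 1 by omega, List.sum_cons]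

lemma preFold (nums : List Int) :
    nums.foldl (fun p x => p ++ [PySem.List.pyGetD p (-1) 0 + x]) [0]
      = (List.range (nums.length + 1)).map (fun j => (nums.take j).sum) := by
  induction nums using List.reverseRecOn with
  | nil => simp
  | append_singleton xs x ih =>
    rw [List.foldl_append, ih]
    rw [List.foldl_cons, List.foldl_nil]
    rw [List.range_succ, List.map_append]
    simp only [List.map_singleton, List.take_length]
    rw [PySem.List.pyGetD_neg_one_append_singleton]
    rw [show (xs ++ [x]).length + 1 = (xs.length + 1) + 1 by simp, List.range_succ,
      List.map_append, List.range_succ, List.map_append]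
    simp only [List.map_singleton, List.take_length]
    have e1 : (List.range xs.length).map (fun j => (xs.take j).sum)
        = (List.range xs.length).map (fun j => ((xs ++ [x]).take j).sum) := by
      apply List.map_congr_left
      intro j hj
      rw [List.take_append_of_le_length (by simp at hj; omega)]
    have e2 : ((xs ++ [x]).take xs.length) = xs := by
      rw [List.take_append_of_le_length (le_refl _), List.take_length]
    have e3 : ((xs ++ [x]).take (xs.length + 1)) = xs ++ [x] := by
      rw [show xs.length + 1 = (xs ++ [x]).length by simp, List.take_length]
    rw [← e1, e2, e3]
    simp

lemma sufFold (nums : List Int) :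
    nums.reverse.foldl (fun s x => (x + PySem.List.pyGetD s 0 0) :: s) [0]
      = (List.range (nums.length + 1)).map (fun j => (nums.drop j).sum) := by
  induction nums with
  | nil => simp
  | cons y ys ih =>
    rw [List.reverse_cons, List.foldl_append, ih, List.foldl_cons, List.foldl_nil]
    rw [show (y :: ys).length + 1 = (ys.length + 1) + 1 from rfl, List.range_succ_eq_map,
      List.map_cons]
    rw [List.range_succ_eq_map, List.map_cons]
    simp only [List.drop_zero, List.map_map]
    congr 1
    · -- heads
      rw [PySem.List.pyGetD_zero_cons]
      simp
    · -- tails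
      have : List.map ((fun j => (List.drop j (y :: ys)).sum) ∘ Nat.succ) (List.range (ys.length + 1))
          = List.map (fun j => (List.drop j ys).sum) (List.range (ys.length + 1)) := by
        apply List.map_congr_left; intro j hj; simp
      rw [this, List.range_succ_eq_map, List.map_cons]
      simp [List.map_map]

lemma iterRows_rowAt (nums : List Int) : ∀ (t k : Nat), 1 ≤ k → 2*k + 2 ≤ nums.length →
    (nums.length - 2)/2 - k = t →
    iterRows (rowAt nums k)
      = (List.range' k ((nums.length - 2)/2 - k + 1)).map (rowAt nums) ++ [[nums.sum]] := by
  intro t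
  induction t with
  | zero =>
    intro k hk h2 ht
    have h3 : nums.length ≤ 2*k + 3 := by omega
    rw [iterRows_step _ (by rw [rowAt_length nums k h2]; omega),
      srow_rowAt_final nums k h2 h3, iterRows_single _ (by simp), ht]
    simp [List.range'_one]
  | succ t ih =>
    intro k hk h2 ht
    have h4 : 2*k + 4 ≤ nums.length := by omega
    rw [iterRows_step _ (by rw [rowAt_length nums k h2]; omega), srow_rowAt nums k h4,
      ih (k+1) (by omega) (by omega) (by omega)]
    rw [show (nums.length - 2)/2 - k + 1 = ((nums.length - 2)/2 - (k+1) + 1) + 1 by omega,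
      List.range'_succ (s := k), List.map_cons]
    simp

lemma iterRows_full (nums : List Int) (h : 2 ≤ nums.length) :
    iterRows nums
      = nums :: ((List.range' 1 ((nums.length - 2)/2)).map (rowAt nums) ++ [[nums.sum]]) := by
  by_cases h4 : 4 ≤ nums.length
  · rw [iterRows_step nums (by omega), srow_init nums h4,
      iterRows_rowAt nums ((nums.length - 2)/2 - 1) 1 (by omega) (by omega) rfl,
      show (nums.length - 2)/2 - 1 + 1 = (nums.length - 2)/2 by omega]
  · rw [iterRows_step nums (by omega), srow_small nums (by omega),
      iterRows_single _ (by simp), show (nums.length - 2)/2 = 0 by omega]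
    simp

lemma pyRange_map_eq (KN : Nat) (f : Int → List Int) (g : Nat → List Int)
    (hfg : ∀ k : Nat, 1 ≤ k → k ≤ KN → f (k : Int) = g k) :
    (PySem.List.pyRange 1 ((KN : Int) + 1) 1).map f = (List.range' 1 KN).map g := by
  induction KN with
  | zero =>
    rw [show ((0 : Nat) : Int) + 1 = 1 by norm_num,
      show PySem.List.pyRange 1 1 = ([] : List Int) from by decide]
    simp
  | succ t ih =>
    rw [show ((t + 1 : Nat) : Int) + 1 = ((t : Int) + 1) + 1 by push_cast; ring,
      PySem.List.pyRange_one_succ_right (by omega), List.map_append,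
      ih (fun k h1 h2 => hfg k h1 (by omega)),
      show t + 1 = t + 1 from rfl, List.range'_concat, List.map_append]
    congr 1
    simp only [List.map_singleton]
    rw [show ((t : Int) + 1) = ((t + 1 : Nat) : Int) by push_cast; ring, hfg (t+1) (by omega) (by omega),
      Nat.add_comm t 1]
    simp

lemma rowFun_eq (nums : List Int) (h2 : 2 ≤ nums.length) (k : Nat) (h1 : 1 ≤ k)
    (hk : k ≤ (nums.length - 2)/2) :
    (PySem.List.pyGetD ((List.range (nums.length + 1)).map (fun j => (nums.take j).sum)) ((k : Int) + 1) 0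
      :: (PySem.List.slice nums (some ((k : Int) + 1)) (some (PySem.List.len nums - (k : Int) - 1))
          ++ [PySem.List.pyGetD ((List.range (nums.length + 1)).map (fun j => (nums.drop j).sum))
                (PySem.List.len nums - (k : Int) - 1) 0]))
      = rowAt nums k := by
  have hn : 2*k + 2 ≤ nums.length := by omega
  rw [rowAt]
  congr 1
  · rw [show ((k : Int) + 1) = ((k + 1 : Nat) : Int) by push_cast; ring, PySem.List.pyGetD_natCast,
      List.getD_eq_getElem _ _ (by simp; omega)]
    simp
  · congr 1
    · rw [PySem.List.len_eq, show ((nums.length : Int) - k - 1) = ((nums.length - k - 1 : Nat) : Int) by omega,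
        show ((k : Int) + 1) = ((k + 1 : Nat) : Int) by push_cast; ring,
        PySem.List.slice_natCast]
      congr 1
      omega
    · congr 1
      rw [PySem.List.len_eq, show ((nums.length : Int) - k - 1) = ((nums.length - k - 1 : Nat) : Int) by omega,
        PySem.List.pyGetD_natCast, List.getD_eq_getElem _ _ (by simp; omega)]
      simp

lemma getsum2 (a b : Int) : PySem.List.pyGetD [a, b] 0 0 + PySem.List.pyGetD [a, b] 1 0 = a + b := by
  simp [pysem]

lemma getsum3 (a b c : Int) :
    PySem.List.pyGetD [a, b, c] 0 0 + PySem.List.pyGetD [a, b, c] 1 0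
      + PySem.List.pyGetD [a, b, c] 2 0 = a + b + c := by
  simp [pysem]

lemma pyGetD_lastRows (xs : List (List Int)) : PySem.List.pyGetD xs (-1) [] = xs.getLastD [] :=
  aLast_def xs

lemma rowAt_val2 (nums : List Int) (k : Nat) (hk : nums.length = 2*k + 2) :
    PySem.List.pyGetD (rowAt nums k) 0 0 + PySem.List.pyGetD (rowAt nums k) 1 0
      = nums.sum := by
  have hM0 : nums.length - 2*k - 2 = 0 := by omega
  have hs := rowAt_sum nums k (by omega)
  rw [rowAt, hM0, List.take_zero, List.nil_append] at hs ⊢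
  rw [getsum2]
  simpa using hs

lemma rowAt_val3 (nums : List Int) (k : Nat) (hk : nums.length = 2*k + 3) :
    PySem.List.pyGetD (rowAt nums k) 0 0 + PySem.List.pyGetD (rowAt nums k) 1 0
      + PySem.List.pyGetD (rowAt nums k) 2 0 = nums.sum := by
  have hM1 : nums.length - 2*k - 2 = 1 := by omega
  have hd : nums.drop (k+1) = nums[k+1]'(by omega) :: nums.drop (k+1+1) :=
    List.drop_eq_getElem_cons (by omega)
  have hs := rowAt_sum nums k (by omega)
  rw [rowAt, hM1, hd, List.take_succ_cons, List.take_zero, List.singleton_append] at hs ⊢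
  rw [getsum3, ← hs]
  simp [List.sum_cons, List.sum_nil]
  ring

set_option maxHeartbeats 1000000 in
lemma alt_eq_iter (nums : List Int) : squeezed_list_alt nums = iterRows nums := by
  by_cases h1 : nums.length ≤ 1
  · rw [squeezed_list_alt, if_pos (by rw [PySem.List.len_eq]; omega), iterRows_single nums h1]
  · push_neg at h1
    have h2 : 2 ≤ nums.length := h1
    have hK : PySem.Int.floordiv (PySem.List.len nums - 2) 2 = (((nums.length - 2)/2 : Nat) : Int) := by
      rw [PySem.List.len_eq, PySem.Int.floordiv_eq_ediv_of_pos (by norm_num)]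
      omega
    rw [squeezed_list_alt]
    simp only [preFold, sufFold, hK, PySem.List.foldl_append_singleton_eq_map]
    rw [if_neg (by rw [PySem.List.len_eq]; omega)]
    rw [pyRange_map_eq ((nums.length - 2)/2) _ (rowAt nums)
        (fun k hk1 hk2 => rowFun_eq nums h2 k hk1 hk2)]
    rcases Nat.eq_zero_or_pos ((nums.length - 2)/2) with hKN | hKN
    · rw [hKN]
      simp only [List.range'_zero, List.map_nil, List.append_nil]
      rw [show PySem.List.pyGetD [nums] (-1) [] = nums from by simp [pyGetD_lastRows]]
      have hn23 : nums.length = 2 ∨ nums.length = 3 := by omega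
      rcases hn23 with hn | hn
      · rcases nums with _|⟨a,_|⟨b,_|⟨c,rest⟩⟩⟩ <;> simp_all
        rw [iterRows_step _ (by simp), srow_small _ (by simp), iterRows_single _ (by simp)]
        simp [PySem.List.pyGetD, PySem.List.pyGet?, PySem.List.pyIdx?]
        try ring
      · rcases nums with _|⟨a,_|⟨b,_|⟨c,_|⟨d,rest⟩⟩⟩⟩ <;> simp_all
        rw [iterRows_step _ (by simp), srow_small _ (by simp), iterRows_single _ (by simp)]
        simp [PySem.List.pyGetD, PySem.List.pyGet?, PySem.List.pyIdx?]
        try ring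
    · obtain ⟨t, ht⟩ : ∃ t, (nums.length - 2)/2 = t + 1 := ⟨(nums.length - 2)/2 - 1, by omega⟩
      have hKcond : 2*(1+t) + 2 ≤ nums.length := by omega
      have hlen' : (rowAt nums (1+t)).length = nums.length - 2*(1+t) := rowAt_length _ _ hKcond
      rw [ht, List.range'_concat, List.map_append, show (1:Nat) + 1*t = 1 + t by omega]
      simp only [List.map_singleton]
      rw [show PySem.List.pyGetD ([nums] ++ (List.map (rowAt nums) (List.range' 1 t) ++ [rowAt nums (1+t)])) (-1) []
            = rowAt nums (1+t) from by
              rw [pyGetD_lastRows,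
                show [nums] ++ (List.map (rowAt nums) (List.range' 1 t) ++ [rowAt nums (1+t)])
                  = ([nums] ++ List.map (rowAt nums) (List.range' 1 t)) ++ [rowAt nums (1+t)] by simp]
              rw [List.getLastD_concat]]
      by_cases hL2 : nums.length = 2*(1+t) + 2
      · rw [if_pos (by rw [hlen']; omega), rowAt_val2 nums (1+t) hL2,
          iterRows_full nums h2, ht, List.range'_concat, List.map_append,
          show (1:Nat) + 1*t = 1 + t by omega]
        simp only [List.map_singleton]
        simp
      · have hL3 : nums.length = 2*(1+t) + 3 := by omega
        rw [if_neg (by rw [hlen']; omega), rowAt_val3 nums (1+t) hL3,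
          iterRows_full nums h2, ht, List.range'_concat, List.map_append,
          show (1:Nat) + 1*t = 1 + t by omega]
        simp only [List.map_singleton]
        simp

-- ===== VERDICT (by name: the statement is the Claim_ definition above) =====
theorem squeezed_list_spec : Claim_equal_squeezed_list := by
  intro nums _hDom
  unfold Spec_squeezed_list
  rw [squeezed_eq_iter, alt_eq_iter]
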